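-- pv_equiv track=rewrite | github.com/Pranavsingh431/Thermo1 | backend/app/services/full_ai_pipeline.py | _summarize_components
-- ===== SOURCE A (Python) =====
-- from typing import List, Dict, Optional, Tuple, Any
--
-- class ComponentType:
--     """Component types based on CIGRE research"""
--     NUTS_BOLTS = "nuts_bolts"
--     MID_SPAN_JOINT = "mid_span_joint"
--     POLYMER_INSULATOR = "polymer_insulator"
--     CONDUCTOR = "conductor"
--     DAMPER = "damper"
--     SPACER = "spacer"
--     CLAMP = "clamp"
--
-- class DefectType:
--     """Defect classifications"""
--     HOTSPOT = "hotspot"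
--     CORROSION = "corrosion"
--     DAMAGE = "damage"
--     CONTAMINATION = "contamination"
--     FOREIGN_OBJECT = "foreign_object"
--     NORMAL = "normal"
--
-- def _summarize_components(components: List[Dict]) -> Dict:
--     """Summarize component detection results"""
--     summary = {
--         'nuts_bolts': 0,
--         'mid_span_joints': 0,
--         'polymer_insulators': 0,
--         'conductors': 0,
--         'dampers': 0,
--         'spacers': 0,
--         'clamps': 0,
--         'defects_found': 0,
--         'normal_components': 0
--     }
--
--     for comp in components:
--         comp_type = comp['component_type']
--         if comp_type == ComponentType.NUTS_BOLTS:
--             summary['nuts_bolts'] += 1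
--         elif comp_type == ComponentType.MID_SPAN_JOINT:
--             summary['mid_span_joints'] += 1
--         elif comp_type == ComponentType.POLYMER_INSULATOR:
--             summary['polymer_insulators'] += 1
--         elif comp_type == ComponentType.CONDUCTOR:
--             summary['conductors'] += 1
--         elif comp_type == ComponentType.DAMPER:
--             summary['dampers'] += 1
--         elif comp_type == ComponentType.SPACER:
--             summary['spacers'] += 1
--         elif comp_type == ComponentType.CLAMP:
--             summary['clamps'] += 1
--
--         if comp.get('defect_type', DefectType.NORMAL) != DefectType.NORMAL:
--             summary['defects_found'] += 1
--         else:
--             summary['normal_components'] += 1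
--
--     return summary
-- ===== SOURCE B (Python) =====
-- def _summarize_components(components):
--     """Summarize component detection results (sort, then run-length encode the type list)."""
--     types = sorted(c['component_type'] for c in components)
--     runs = {}
--     i, n = 0, len(types)
--     while i < n:
--         j = i + 1
--         while j < n and types[j] == types[i]:
--             j += 1
--         runs[types[i]] = j - i
--         i = j
--     defects = sum(1 for c in components
--                   if c.get('defect_type', 'normal') != 'normal')
--     return {
--         'nuts_bolts': runs.get('nuts_bolts', 0),
--         'mid_span_joints': runs.get('mid_span_joint', 0),
--         'polymer_insulators': runs.get('polymer_insulator', 0),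
--         'conductors': runs.get('conductor', 0),
--         'dampers': runs.get('damper', 0),
--         'spacers': runs.get('spacer', 0),
--         'clamps': runs.get('clamp', 0),
--         'defects_found': defects,
--         'normal_components': len(components) - defects,
--     }
-- ===== Notes on version B (the rewrite author's own statement) =====
-- stated objective: alternative
-- what changed: B sorts the component-type list and run-length encodes it with an index/while scan to obtain per-type counts, plus one separate defect count, instead of A's single pass with a 7-way if/elif dispatch into a preinitialized summary dict.
import Mathlib
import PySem

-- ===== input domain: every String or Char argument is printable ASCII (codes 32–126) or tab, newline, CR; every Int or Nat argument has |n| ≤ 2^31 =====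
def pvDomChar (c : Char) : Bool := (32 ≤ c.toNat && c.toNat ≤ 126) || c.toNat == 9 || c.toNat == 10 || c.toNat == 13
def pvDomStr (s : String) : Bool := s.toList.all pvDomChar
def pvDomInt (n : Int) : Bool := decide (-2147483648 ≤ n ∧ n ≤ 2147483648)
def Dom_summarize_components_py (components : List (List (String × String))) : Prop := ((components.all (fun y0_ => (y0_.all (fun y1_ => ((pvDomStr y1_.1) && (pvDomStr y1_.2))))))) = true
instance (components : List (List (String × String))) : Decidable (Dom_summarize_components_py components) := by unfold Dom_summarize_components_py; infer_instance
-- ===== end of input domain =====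

-- B sorts the type list and run-length encodes it for the per-type counts (different decomposition, similar cost).
-- ===== PORT A =====
-- A's per-item loop body: 7-way dispatch on component_type, then defect/normal tally.
-- comp['component_type'] raises KeyError when absent; Pre_ excludes that, the port reads "" there.
def pvStepA (s : PySem.Dict String Int) (comp : List (String × String)) : PySem.Dict String Int :=
  let d := PySem.Dict.ofList comp
  let ct := (d.get? "component_type").getD ""
  let s :=
    if ct == "nuts_bolts" then s.modify "nuts_bolts" 0 (· + 1)
    else if ct == "mid_span_joint" then s.modify "mid_span_joints" 0 (· + 1)
    else if ct == "polymer_insulator" then s.modify "polymer_insulators" 0 (· + 1)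
    else if ct == "conductor" then s.modify "conductors" 0 (· + 1)
    else if ct == "damper" then s.modify "dampers" 0 (· + 1)
    else if ct == "spacer" then s.modify "spacers" 0 (· + 1)
    else if ct == "clamp" then s.modify "clamps" 0 (· + 1)
    else s
  if d.getD "defect_type" "normal" != "normal" then s.modify "defects_found" 0 (· + 1)
  else s.modify "normal_components" 0 (· + 1)

def summarize_components_py (components : List (List (String × String))) : List (String × Int) :=
  let summary : PySem.Dict String Int := PySem.Dict.ofList
    [("nuts_bolts", 0), ("mid_span_joints", 0), ("polymer_insulators", 0), ("conductors", 0),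
     ("dampers", 0), ("spacers", 0), ("clamps", 0), ("defects_found", 0), ("normal_components", 0)]
  (components.foldl pvStepA summary).items

-- ===== PORT B =====
-- B's outer while loop over the sorted type list: one recursive step per run of equal
-- types (the inner 'while types[j] == types[i]' is the takeWhile/dropWhile split).
def pvRuns : List String → PySem.Dict String Int → PySem.Dict String Int
  | [], d => d
  | t :: rest, d =>
      pvRuns (rest.dropWhile (· == t))
             (d.insert t (1 + ((rest.takeWhile (· == t)).length : Int)))
termination_by l _ => l.length
decreasing_by
  simp only [List.length_cons]
  exact Nat.lt_succ_of_le (List.length_dropWhile_le _ _)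

def summarize_components_py_alt (components : List (List (String × String))) : List (String × Int) :=
  let types := PySem.List.sorted
    (components.map (fun comp => ((PySem.Dict.ofList comp).get? "component_type").getD ""))
    (fun x => x) false
  let runs := pvRuns types PySem.Dict.empty
  let defects : Int :=
    ((components.filter
        (fun comp => (PySem.Dict.ofList comp).getD "defect_type" "normal" != "normal")).length : Int)
  [("nuts_bolts", runs.getD "nuts_bolts" 0),
   ("mid_span_joints", runs.getD "mid_span_joint" 0),
   ("polymer_insulators", runs.getD "polymer_insulator" 0),
   ("conductors", runs.getD "conductor" 0),
   ("dampers", runs.getD "damper" 0),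
   ("spacers", runs.getD "spacer" 0),
   ("clamps", runs.getD "clamp" 0),
   ("defects_found", defects),
   ("normal_components", (components.length : Int) - defects)]

-- ===== PRECONDITION & SPEC =====
-- Pre_ excludes components missing the 'component_type' key, on which Python A raises KeyError (B raises too).
def Pre_summarize_components_py (components : List (List (String × String))) : Prop :=
  (components.all (fun comp => comp.any (fun p => p.1 == "component_type"))) = true
instance (components : List (List (String × String))) : Decidable (Pre_summarize_components_py components) := by unfold Pre_summarize_components_py; infer_instance
def pvWitness_summarize_components_py : (List (List (String × String))) :=
  [[("component_type", "nuts_bolts"), ("defect_type", "hotspot")], [("component_type", "damper")]]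
def Spec_summarize_components_py (components : List (List (String × String))) (out : List (String × Int)) : Prop := out = summarize_components_py_alt components
instance (components : List (List (String × String))) (out : List (String × Int)) : Decidable (Spec_summarize_components_py components out) := by unfold Spec_summarize_components_py; infer_instance

-- ===== CLAIM (what is proved, stated in full; the proofs are below) =====
def Claim_equal_summarize_components_py : Prop := ∀ (components : List (List (String × String))), Dom_summarize_components_py components → Pre_summarize_components_py components → Spec_summarize_components_py components (summarize_components_py components)

-- ===== LEMMAS AND PROOFS =====

def pvCt (comp : List (String × String)) : String :=
  ((PySem.Dict.ofList comp).get? "component_type").getD ""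

def pvIsDef (comp : List (String × String)) : Bool :=
  (PySem.Dict.ofList comp).getD "defect_type" "normal" != "normal"

def pvMk9 (a b c d e f g h i : Int) : PySem.Dict String Int :=
  PySem.Dict.ofList
    [("nuts_bolts", a), ("mid_span_joints", b), ("polymer_insulators", c), ("conductors", d),
     ("dampers", e), ("spacers", f), ("clamps", g), ("defects_found", h), ("normal_components", i)]

lemma pvCt_eq (comp : List (String × String)) :
    ((PySem.Dict.ofList comp).get? "component_type").getD "" = pvCt comp := rfl

lemma pvIsDef_eq (comp : List (String × String)) :
    ((PySem.Dict.ofList comp).getD "defect_type" "normal" != "normal") = pvIsDef comp := rfl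

lemma pvMod1 (a b c d e f g h i : Int) :
    (pvMk9 a b c d e f g h i).modify "nuts_bolts" 0 (· + 1) = pvMk9 (a+1) b c d e f g h i := by
  simp [pvMk9, PySem.Dict.modify, PySem.Dict.ofList, PySem.Dict.update, PySem.Dict.insert,
        PySem.Dict.getD, PySem.Dict.get?, PySem.Dict.empty, PySem.Dict.contains]

lemma pvMod2 (a b c d e f g h i : Int) :
    (pvMk9 a b c d e f g h i).modify "mid_span_joints" 0 (· + 1) = pvMk9 a (b+1) c d e f g h i := by
  simp [pvMk9, PySem.Dict.modify, PySem.Dict.ofList, PySem.Dict.update, PySem.Dict.insert,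
        PySem.Dict.getD, PySem.Dict.get?, PySem.Dict.empty, PySem.Dict.contains]

lemma pvMod3 (a b c d e f g h i : Int) :
    (pvMk9 a b c d e f g h i).modify "polymer_insulators" 0 (· + 1) = pvMk9 a b (c+1) d e f g h i := by
  simp [pvMk9, PySem.Dict.modify, PySem.Dict.ofList, PySem.Dict.update, PySem.Dict.insert,
        PySem.Dict.getD, PySem.Dict.get?, PySem.Dict.empty, PySem.Dict.contains]

lemma pvMod4 (a b c d e f g h i : Int) :
    (pvMk9 a b c d e f g h i).modify "conductors" 0 (· + 1) = pvMk9 a b c (d+1) e f g h i := by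
  simp [pvMk9, PySem.Dict.modify, PySem.Dict.ofList, PySem.Dict.update, PySem.Dict.insert,
        PySem.Dict.getD, PySem.Dict.get?, PySem.Dict.empty, PySem.Dict.contains]

lemma pvMod5 (a b c d e f g h i : Int) :
    (pvMk9 a b c d e f g h i).modify "dampers" 0 (· + 1) = pvMk9 a b c d (e+1) f g h i := by
  simp [pvMk9, PySem.Dict.modify, PySem.Dict.ofList, PySem.Dict.update, PySem.Dict.insert,
        PySem.Dict.getD, PySem.Dict.get?, PySem.Dict.empty, PySem.Dict.contains]

lemma pvMod6 (a b c d e f g h i : Int) :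
    (pvMk9 a b c d e f g h i).modify "spacers" 0 (· + 1) = pvMk9 a b c d e (f+1) g h i := by
  simp [pvMk9, PySem.Dict.modify, PySem.Dict.ofList, PySem.Dict.update, PySem.Dict.insert,
        PySem.Dict.getD, PySem.Dict.get?, PySem.Dict.empty, PySem.Dict.contains]

lemma pvMod7 (a b c d e f g h i : Int) :
    (pvMk9 a b c d e f g h i).modify "clamps" 0 (· + 1) = pvMk9 a b c d e f (g+1) h i := by
  simp [pvMk9, PySem.Dict.modify, PySem.Dict.ofList, PySem.Dict.update, PySem.Dict.insert,
        PySem.Dict.getD, PySem.Dict.get?, PySem.Dict.empty, PySem.Dict.contains]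

lemma pvMod8 (a b c d e f g h i : Int) :
    (pvMk9 a b c d e f g h i).modify "defects_found" 0 (· + 1) = pvMk9 a b c d e f g (h+1) i := by
  simp [pvMk9, PySem.Dict.modify, PySem.Dict.ofList, PySem.Dict.update, PySem.Dict.insert,
        PySem.Dict.getD, PySem.Dict.get?, PySem.Dict.empty, PySem.Dict.contains]

lemma pvMod9 (a b c d e f g h i : Int) :
    (pvMk9 a b c d e f g h i).modify "normal_components" 0 (· + 1) = pvMk9 a b c d e f g h (i+1) := by
  simp [pvMk9, PySem.Dict.modify, PySem.Dict.ofList, PySem.Dict.update, PySem.Dict.insert,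
        PySem.Dict.getD, PySem.Dict.get?, PySem.Dict.empty, PySem.Dict.contains]

lemma pvMk9_items (a b c d e f g h i : Int) :
    (pvMk9 a b c d e f g h i).items =
      [("nuts_bolts", a), ("mid_span_joints", b), ("polymer_insulators", c), ("conductors", d),
       ("dampers", e), ("spacers", f), ("clamps", g), ("defects_found", h), ("normal_components", i)] := by
  simp [pvMk9, PySem.Dict.ofList, PySem.Dict.update, PySem.Dict.insert,
        PySem.Dict.empty, PySem.Dict.contains]

lemma pvStepA_mk9 (comp : List (String × String)) (a b c d e f g h i : Int) :
    pvStepA (pvMk9 a b c d e f g h i) comp =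
      pvMk9 (a + if pvCt comp == "nuts_bolts" then 1 else 0)
            (b + if pvCt comp == "mid_span_joint" then 1 else 0)
            (c + if pvCt comp == "polymer_insulator" then 1 else 0)
            (d + if pvCt comp == "conductor" then 1 else 0)
            (e + if pvCt comp == "damper" then 1 else 0)
            (f + if pvCt comp == "spacer" then 1 else 0)
            (g + if pvCt comp == "clamp" then 1 else 0)
            (h + if pvIsDef comp then 1 else 0)
            (i + if pvIsDef comp then 0 else 1) := by
  simp only [pvStepA]
  rw [pvCt_eq, pvIsDef_eq]
  generalize pvCt comp = ct
  generalize pvIsDef comp = df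
  split_ifs <;>
    simp_all [pvMod1, pvMod2, pvMod3, pvMod4, pvMod5, pvMod6, pvMod7, pvMod8, pvMod9]

lemma pvFoldA (l : List (List (String × String))) (a b c d e f g h i : Int) :
    l.foldl pvStepA (pvMk9 a b c d e f g h i) =
      pvMk9 (a + (l.countP (fun comp => pvCt comp == "nuts_bolts") : Int))
            (b + (l.countP (fun comp => pvCt comp == "mid_span_joint") : Int))
            (c + (l.countP (fun comp => pvCt comp == "polymer_insulator") : Int))
            (d + (l.countP (fun comp => pvCt comp == "conductor") : Int))
            (e + (l.countP (fun comp => pvCt comp == "damper") : Int))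
            (f + (l.countP (fun comp => pvCt comp == "spacer") : Int))
            (g + (l.countP (fun comp => pvCt comp == "clamp") : Int))
            (h + (l.countP pvIsDef : Int))
            (i + (l.countP (fun comp => !pvIsDef comp) : Int)) := by
  induction l generalizing a b c d e f g h i with
  | nil => simp
  | cons x l ih =>
    rw [List.foldl_cons, pvStepA_mk9, ih]
    simp only [List.countP_cons]
    push_cast
    cases hx : pvIsDef x <;> simp <;> ring_nf

-- The run-length dict of a sorted (Pairwise ≤) list looks up the multiplicity of each value.
lemma pvRuns_getD (l : List String) (d : PySem.Dict String Int) (v : String)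
    (hl : l.Pairwise (· ≤ ·)) :
    (pvRuns l d).getD v 0 = if l.count v = 0 then d.getD v 0 else (l.count v : Int) := by
  induction l, d using pvRuns.induct generalizing v with
  | case1 d => simp [pvRuns]
  | case2 t rest d ih =>
    have hrest : rest.Pairwise (· ≤ ·) := hl.of_cons
    have hdw : (rest.dropWhile (· == t)).Pairwise (· ≤ ·) :=
      hrest.sublist (List.dropWhile_sublist _)
    have ht_le : ∀ x ∈ rest, t ≤ x := fun x hx => (List.pairwise_cons.1 hl).1 x hx
    have ht_not : t ∉ rest.dropWhile (· == t) := by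
      cases hdwc : rest.dropWhile (· == t) with
      | nil => simp
      | cons h tl =>
        have hh_mem : h ∈ rest := (List.dropWhile_sublist _).subset
          (by rw [hdwc]; exact List.mem_cons_self)
        have hh_ne : ¬ ((h == t) = true) := by
          have hlen : 0 < (rest.dropWhile (· == t)).length := by simp [hdwc]
          have := List.dropWhile_get_zero_not (· == t) rest hlen
          simpa [hdwc] using this
        have hh_ne' : t ≠ h := fun he => hh_ne (by simp [he])
        have ht_lt : t < h := lt_of_le_of_ne (ht_le h hh_mem) hh_ne'
        intro hmem
        rcases List.mem_cons.1 hmem with h1 | h1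
        · exact hh_ne' h1
        · have hle : h ≤ t := by
            have hp := hdw
            rw [hdwc] at hp
            exact (List.pairwise_cons.1 hp).1 t h1
          exact absurd (lt_of_lt_of_le ht_lt hle) (lt_irrefl t)
    have hcount_dw_t : (rest.dropWhile (· == t)).count t = 0 :=
      List.count_eq_zero.2 ht_not
    have hcount_tk : (rest.takeWhile (· == t)).count t = (rest.takeWhile (· == t)).length := by
      apply List.count_eq_length.2
      intro b hb
      exact (eq_of_beq (List.mem_takeWhile_imp (p := (· == t)) hb)).symm
    have hsplit : rest = rest.takeWhile (· == t) ++ rest.dropWhile (· == t) :=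
      (List.takeWhile_append_dropWhile).symm
    rw [pvRuns, ih v hdw]
    by_cases hv : v = t
    · subst hv
      have hcnt : (v :: rest).count v = 1 + (rest.takeWhile (· == v)).length := by
        rw [List.count_cons_self]
        conv_lhs => rw [hsplit]
        rw [List.count_append, hcount_tk, hcount_dw_t]
        omega
      rw [if_pos hcount_dw_t, PySem.Dict.getD_insert_self, hcnt, if_neg (by omega)]
      push_cast; ring
    · have hvt : (rest.takeWhile (· == t)).count v = 0 := by
        apply List.count_eq_zero.2
        intro hmem
        exact hv (by simpa using List.mem_takeWhile_imp hmem)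
      have hrest_cnt : rest.count v
          = (rest.takeWhile (· == t)).count v + (rest.dropWhile (· == t)).count v := by
        conv_lhs => rw [hsplit]
        exact List.count_append ..
      have hcnt : (t :: rest).count v = (rest.dropWhile (· == t)).count v := by
        rw [List.count_cons, hrest_cnt, hvt]
        simp [Ne.symm hv]
      rw [hcnt]
      rcases Nat.eq_zero_or_pos ((rest.dropWhile (· == t)).count v) with h0 | hpos
      · rw [if_pos h0, if_pos h0, PySem.Dict.getD_insert, if_neg hv]
      · rw [if_neg (by omega), if_neg (by omega)]

lemma pvRuns_sorted_getD (l : List String) (v : String) (hl : l.Pairwise (· ≤ ·)) :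
    (pvRuns l PySem.Dict.empty).getD v 0 = (l.count v : Int) := by
  rw [pvRuns_getD l _ v hl]
  split
  · simp_all
  · rfl

-- ===== VERDICT (by name: the statement is the Claim_ definition above) =====
theorem summarize_components_py_spec : Claim_equal_summarize_components_py := by
  intro comps _ _
  unfold Spec_summarize_components_py summarize_components_py summarize_components_py_alt
  dsimp only
  have hinit : PySem.Dict.ofList
      ([("nuts_bolts", 0), ("mid_span_joints", 0), ("polymer_insulators", 0), ("conductors", 0),
        ("dampers", 0), ("spacers", 0), ("clamps", 0), ("defects_found", 0), ("normal_components", 0)]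
        : List (String × Int)) = pvMk9 0 0 0 0 0 0 0 0 0 := rfl
  rw [hinit, pvFoldA, pvMk9_items]
  have hpw : (PySem.List.sorted (comps.map pvCt) (fun x => x) false).Pairwise (· ≤ ·) :=
    PySem.List.sorted_pairwise _ _
  have hperm : (PySem.List.sorted (comps.map pvCt) (fun x => x) false).Perm (comps.map pvCt) :=
    PySem.List.sorted_perm _ _ _
  have hruns : ∀ v : String,
      (pvRuns (PySem.List.sorted (comps.map pvCt) (fun x => x) false) PySem.Dict.empty).getD v 0
        = (comps.countP (fun comp => pvCt comp == v) : Int) := by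
    intro v
    rw [pvRuns_sorted_getD _ v hpw, hperm.count_eq]
    simp [List.count, List.countP_map, Function.comp_def]
  have hmap : (comps.map (fun comp => ((PySem.Dict.ofList comp).get? "component_type").getD ""))
      = comps.map pvCt := rfl
  rw [hmap]
  have hdef : (comps.filter
      (fun comp => (PySem.Dict.ofList comp).getD "defect_type" "normal" != "normal")).length
      = comps.countP pvIsDef := by
    rw [List.countP_eq_length_filter]
    rfl
  have hnorm : (comps.countP (fun comp => !pvIsDef comp) : Int)
      = (comps.length : Int) - (comps.countP pvIsDef : Int) := by
    have h := List.length_eq_countP_add_countP (p := pvIsDef) (l := comps)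
    have h2 : (fun a => decide ¬ pvIsDef a = true) = (fun comp => !pvIsDef comp) := by
      funext c; cases pvIsDef c <;> simp
    rw [h2] at h
    omega
  simp only [hruns, hdef, hnorm, zero_add]
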